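-- pv_equiv track=rewrite | github.com/ravalpiyush12/performance_assurance | AIML_Project/core/performance-automation/performance-monitoring/fetchers/appdynamics_fetcher.py | _determine_metric_type
-- ===== SOURCE A (Python) =====
-- from typing import Dict, List, Optional, Tuple
--
-- def _determine_metric_type(config: Dict, widget_type: str) -> str:
--     """
--     Determine the overall metric type for the widget
--
--     Args:
--         config: Widget configuration
--         widget_type: Widget type from AppDynamics
--
--     Returns:
--         Metric type: 'jvm', 'transaction', 'combined', 'custom'
--     """
--     categories = set()
--     has_nodes = False
--
--     for metric_info in config['apps_tiers_nodes']:
--         category = metric_info.get('metric_category', '')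
--
--         if category:
--             # Simplify categories for grouping
--             if 'jvm' in category or 'hardware' in category:
--                 categories.add('jvm')
--             elif 'transaction' in category:
--                 categories.add('transaction')
--             else:
--                 categories.add('custom')
--
--         if metric_info.get('node_name'):
--             has_nodes = True
--
--     # Determine overall type
--     if 'jvm' in categories and 'transaction' in categories:
--         return 'combined'
--     elif 'jvm' in categories:
--         return 'jvm'
--     elif 'transaction' in categories:
--         return 'transaction'
--     else:
--         return 'custom'
-- ===== SOURCE B (Python) =====
-- def _determine_metric_type(config, widget_type):
--     """Classify the widget metric type via two direct boolean scans,
--     with no intermediate set and without the unused has_nodes flag."""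
--     metrics = config['apps_tiers_nodes']
--
--     def _is_jvm(c):
--         return 'jvm' in c or 'hardware' in c
--
--     has_jvm = any(_is_jvm(m.get('metric_category', '')) for m in metrics)
--     has_transaction = any(
--         'transaction' in m.get('metric_category', '')
--         and not _is_jvm(m.get('metric_category', ''))
--         for m in metrics
--     )
--
--     if has_jvm and has_transaction:
--         return 'combined'
--     if has_jvm:
--         return 'jvm'
--     if has_transaction:
--         return 'transaction'
--     return 'custom'
-- ===== Notes on version B (the rewrite author's own statement) =====
-- stated objective: simpler
-- what changed: Replaces the accumulated category set and the unused has_nodes flag with two direct boolean any() scans (jvm-like category present; transaction category present that is not jvm-like) feeding the same precedence chain.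
import Mathlib
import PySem

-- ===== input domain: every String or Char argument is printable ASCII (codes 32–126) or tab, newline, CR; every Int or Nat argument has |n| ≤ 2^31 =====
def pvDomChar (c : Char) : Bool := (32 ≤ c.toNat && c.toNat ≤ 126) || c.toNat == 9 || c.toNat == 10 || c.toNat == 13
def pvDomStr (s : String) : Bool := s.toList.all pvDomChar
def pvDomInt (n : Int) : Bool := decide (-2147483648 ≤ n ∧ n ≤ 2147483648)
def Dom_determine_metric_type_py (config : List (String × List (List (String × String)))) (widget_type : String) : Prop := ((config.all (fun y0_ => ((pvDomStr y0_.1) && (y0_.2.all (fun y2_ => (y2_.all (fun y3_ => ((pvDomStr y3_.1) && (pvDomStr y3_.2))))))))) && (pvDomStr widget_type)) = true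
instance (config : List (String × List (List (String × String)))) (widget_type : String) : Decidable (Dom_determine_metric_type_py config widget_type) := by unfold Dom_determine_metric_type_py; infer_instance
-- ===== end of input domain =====

-- B replaces A's accumulated category set (and the unused has_nodes flag) with two
-- boolean any-scans feeding the same precedence chain; objective: simpler.

-- ===== PORT A =====
-- one loop iteration of A: update (categories, has_nodes) from one metric_info dict
def pvStepA (st : PySem.Set String × Bool) (m : List (String × String)) :
    PySem.Set String × Bool :=
  let category := (PySem.Dict.mk m).getD "metric_category" ""
  let cats :=
    if category ≠ "" then
      if PySem.Str.isIn "jvm" category || PySem.Str.isIn "hardware" category then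
        PySem.Set.add st.1 "jvm"
      else if PySem.Str.isIn "transaction" category then
        PySem.Set.add st.1 "transaction"
      else
        PySem.Set.add st.1 "custom"
    else st.1
  -- metric_info.get('node_name') is truthy iff present and non-empty
  let hasNodes := if (PySem.Dict.mk m).getD "node_name" "" ≠ "" then true else st.2
  (cats, hasNodes)

def determine_metric_type_py (config : List (String × List (List (String × String)))) (widget_type : String) : String :=
  match (PySem.Dict.mk config).get? "apps_tiers_nodes" with
  | none => ""  -- KeyError in Python; excluded by Pre_
  | some ms =>
    let st := ms.foldl pvStepA (PySem.Set.empty, false)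
    let categories := st.1
    if PySem.Set.contains categories "jvm" && PySem.Set.contains categories "transaction" then
      "combined"
    else if PySem.Set.contains categories "jvm" then "jvm"
    else if PySem.Set.contains categories "transaction" then "transaction"
    else "custom"

-- ===== PORT B =====
def pvIsJvmCat (c : String) : Bool :=
  PySem.Str.isIn "jvm" c || PySem.Str.isIn "hardware" c

def pvCatOf (m : List (String × String)) : String :=
  (PySem.Dict.mk m).getD "metric_category" ""

def determine_metric_type_py_alt (config : List (String × List (List (String × String)))) (widget_type : String) : String :=
  match (PySem.Dict.mk config).get? "apps_tiers_nodes" with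
  | none => ""  -- KeyError in Python; excluded by Pre_
  | some ms =>
    let hasJvm := ms.any (fun m => pvIsJvmCat (pvCatOf m))
    let hasTx := ms.any (fun m =>
      PySem.Str.isIn "transaction" (pvCatOf m) && !pvIsJvmCat (pvCatOf m))
    if hasJvm && hasTx then "combined"
    else if hasJvm then "jvm"
    else if hasTx then "transaction"
    else "custom"

-- ===== PRECONDITION & SPEC =====
-- Pre_ excludes exactly the configs without the 'apps_tiers_nodes' key, where Python A raises KeyError.
def Pre_determine_metric_type_py (config : List (String × List (List (String × String)))) (widget_type : String) : Prop :=
  ((PySem.Dict.mk config).get? "apps_tiers_nodes").isSome = true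
instance (config : List (String × List (List (String × String)))) (widget_type : String) : Decidable (Pre_determine_metric_type_py config widget_type) := by unfold Pre_determine_metric_type_py; infer_instance

def pvWitness_determine_metric_type_py : (List (String × List (List (String × String)))) × String :=
  ([("apps_tiers_nodes", [[("metric_category", "jvm heap")], [("metric_category", "transaction avg")]])], "pie")

def Spec_determine_metric_type_py (config : List (String × List (List (String × String)))) (widget_type : String) (out : String) : Prop := out = determine_metric_type_py_alt config widget_type
instance (config : List (String × List (List (String × String)))) (widget_type : String) (out : String) : Decidable (Spec_determine_metric_type_py config widget_type out) := by unfold Spec_determine_metric_type_py; infer_instance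

-- ===== CLAIM (what is proved, stated in full; the proofs are below) =====
def Claim_equal_determine_metric_type_py : Prop := ∀ (config : List (String × List (List (String × String)))) (widget_type : String), Dom_determine_metric_type_py config widget_type → Pre_determine_metric_type_py config widget_type → Spec_determine_metric_type_py config widget_type (determine_metric_type_py config widget_type)

-- ===== LEMMAS AND PROOFS =====

theorem contains_stepA_jvm (st : PySem.Set String × Bool) (m : List (String × String)) :
    PySem.Set.contains (pvStepA st m).1 "jvm"
      = (PySem.Set.contains st.1 "jvm" || pvIsJvmCat (pvCatOf m)) := by
  unfold pvStepA pvIsJvmCat pvCatOf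
  by_cases h : (PySem.Dict.mk m).getD "metric_category" "" = ""
  · rw [h]
    simp
    intro hc
    exact absurd hc (by decide)
  · simp only [h]
    split_ifs with h1 h2 <;> simp_all [PySem.Set.mem_add]

theorem contains_stepA_tx (st : PySem.Set String × Bool) (m : List (String × String)) :
    PySem.Set.contains (pvStepA st m).1 "transaction"
      = (PySem.Set.contains st.1 "transaction"
          || (PySem.Str.isIn "transaction" (pvCatOf m) && !pvIsJvmCat (pvCatOf m))) := by
  unfold pvStepA pvIsJvmCat pvCatOf
  by_cases h : (PySem.Dict.mk m).getD "metric_category" "" = ""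
  · rw [h]
    simp
    intro hc
    exact absurd hc (by decide)
  · simp only [h]
    split_ifs with h1 h2 <;> simp_all [PySem.Set.mem_add]
    intro _ hj hh
    rcases h2 with h2 | h2 <;> simp_all

theorem foldA_contains (ms : List (List (String × String))) (st : PySem.Set String × Bool)
    (key : String) (p : List (String × String) → Bool)
    (hstep : ∀ st' m, PySem.Set.contains (pvStepA st' m).1 key
        = (PySem.Set.contains st'.1 key || p m)) :
    PySem.Set.contains (ms.foldl pvStepA st).1 key
      = (PySem.Set.contains st.1 key || ms.any p) := by
  induction ms generalizing st with
  | nil => simp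
  | cons m rest ih =>
    simp only [List.foldl_cons, List.any_cons, ih, hstep]
    cases PySem.Set.contains st.1 key <;> cases p m <;> simp

-- ===== VERDICT (by name: the statement is the Claim_ definition above) =====
theorem determine_metric_type_py_spec : Claim_equal_determine_metric_type_py := by
  intro config widget_type _ _
  unfold Spec_determine_metric_type_py determine_metric_type_py determine_metric_type_py_alt
  cases hms : (PySem.Dict.mk config).get? "apps_tiers_nodes" with
  | none => rfl
  | some ms =>
    simp only
    rw [foldA_contains ms _ "jvm" (fun m => pvIsJvmCat (pvCatOf m)) contains_stepA_jvm,
        foldA_contains ms _ "transaction"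
          (fun m => PySem.Str.isIn "transaction" (pvCatOf m) && !pvIsJvmCat (pvCatOf m))
          contains_stepA_tx]
    simp [PySem.Set.empty]
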